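-- pv_equiv track=rewrite | github.com/andre-barbe/Coal-Restrictions | ReadCSV.py | break_into_matrices
-- ===== SOURCE A (Python) =====
-- from typing import List
--
-- def break_into_matrices(arraylines: List[str]) -> List[str]:
--     """
--     Groups the lines of an array by matrix
--     :param arraylines: lines of a single array
--     :return:
--     """
--     listofmatrices = []
--     currentmatrix = []
--     for i, line in enumerate(arraylines):
--         if line[0:14] == " ! The matrix ":
--             listofmatrices.append(currentmatrix)
--             currentmatrix = []
--         currentmatrix.append(line)
--         if i == len(arraylines) - 1:
--             listofmatrices.append(currentmatrix)
--     return listofmatrices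
-- ===== SOURCE B (Python) =====
-- from typing import List
--
-- def break_into_matrices(arraylines: List[str]) -> List[str]:
--     """Group lines into matrices: boundary-index-then-slice decomposition."""
--     if not arraylines:
--         return []
--     bounds = [i for i, line in enumerate(arraylines) if line[0:14] == " ! The matrix "]
--     pts = [0] + bounds + [len(arraylines)]
--     return [arraylines[a:b] for a, b in zip(pts, pts[1:])]
-- ===== Notes on version B (the rewrite author's own statement) =====
-- stated objective: simpler
-- what changed: Replaces the stateful accumulator loop (current chunk + last-index test) with a one-pass collection of delimiter indices followed by slicing between consecutive boundary points.
import Mathlib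
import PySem

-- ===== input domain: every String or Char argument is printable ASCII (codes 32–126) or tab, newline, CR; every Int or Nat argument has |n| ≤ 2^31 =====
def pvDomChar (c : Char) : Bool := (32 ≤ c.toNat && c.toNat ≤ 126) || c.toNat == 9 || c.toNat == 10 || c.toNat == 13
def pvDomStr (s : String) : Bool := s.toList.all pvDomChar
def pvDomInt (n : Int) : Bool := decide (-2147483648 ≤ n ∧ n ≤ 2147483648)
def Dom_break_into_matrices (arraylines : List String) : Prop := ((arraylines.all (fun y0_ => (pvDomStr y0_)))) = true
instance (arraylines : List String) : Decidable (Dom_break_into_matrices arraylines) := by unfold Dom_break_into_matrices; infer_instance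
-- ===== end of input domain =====

-- B replaces A's stateful accumulator loop by collecting delimiter indices once and slicing
-- between consecutive boundary points (objective: simpler decomposition; same cost).


-- ===== PORT A =====
-- shared helper for the test `line[0:14] == " ! The matrix "` appearing verbatim in both Pythons
def pvDelim (line : String) : Bool :=
  PySem.Str.slice line (some 0) (some 14) == " ! The matrix "

def break_into_matrices (arraylines : List String) : List (List String) :=
  let st := (PySem.List.enumerate arraylines 0).foldl
    (fun (st : List (List String) × List String) (p : Int × String) =>
      let lom := st.1
      let cm := st.2
      let (lom, cm) := if pvDelim p.2 then (lom ++ [cm], ([] : List String)) else (lom, cm)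
      let cm := cm ++ [p.2]
      let lom := if p.1 == (arraylines.length : Int) - 1 then lom ++ [cm] else lom
      (lom, cm))
    ([], [])
  st.1

-- ===== PORT B =====
def break_into_matrices_alt (arraylines : List String) : List (List String) :=
  if arraylines = [] then []
  else
    let bounds := ((PySem.List.enumerate arraylines 0).filter (fun p => pvDelim p.2)).map (·.1)
    let pts := [(0 : Int)] ++ bounds ++ [(arraylines.length : Int)]
    (pts.zip (PySem.List.slice pts (some 1) none)).map
      (fun p => PySem.List.slice arraylines (some p.1) (some p.2))

-- ===== PRECONDITION & SPEC =====
def Spec_break_into_matrices (arraylines : List String) (out : List (List String)) : Prop := out = break_into_matrices_alt arraylines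
instance (arraylines : List String) (out : List (List String)) : Decidable (Spec_break_into_matrices arraylines out) := by unfold Spec_break_into_matrices; infer_instance

-- ===== CLAIM (what is proved, stated in full; the proofs are below) =====
def Claim_equal_break_into_matrices : Prop := ∀ (arraylines : List String), Dom_break_into_matrices arraylines → Spec_break_into_matrices arraylines (break_into_matrices arraylines)

-- ===== LEMMAS AND PROOFS =====

-- reference splitter: both ports are proved equal to `pvSplit []` on nonempty input
def pvSplit (cur : List String) : List String → List (List String)
  | [] => [cur]
  | x :: xs => if pvDelim x then cur :: pvSplit [x] xs else pvSplit (cur ++ [x]) xs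

-- chunks of `full` between consecutive cut points
def pvChunks (full : List String) : List Nat → List (List String)
  | p :: q :: rest => (full.drop p).take (q - p) :: pvChunks full (q :: rest)
  | _ => []

-- delimiter positions
def pvIdx : List String → List Nat
  | [] => []
  | x :: xs => if pvDelim x then 0 :: (pvIdx xs).map (· + 1) else (pvIdx xs).map (· + 1)

theorem pvFoldA (xs : List String) (n k : Int) (lom : List (List String)) (cur : List String)
    (hne : xs ≠ []) (hk : k + xs.length = n) :
    ((PySem.List.enumerate xs k).foldl
      (fun (st : List (List String) × List String) (p : Int × String) =>
        let lom := st.1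
        let cm := st.2
        let (lom, cm) := if pvDelim p.2 then (lom ++ [cm], ([] : List String)) else (lom, cm)
        let cm := cm ++ [p.2]
        let lom := if p.1 == n - 1 then lom ++ [cm] else lom
        (lom, cm))
      (lom, cur)).1 = lom ++ pvSplit cur xs := by
  induction xs generalizing k lom cur with
  | nil => exact absurd rfl hne
  | cons x xs ih =>
    rw [PySem.List.enumerate_cons, List.foldl_cons]
    cases xs with
    | nil =>
      have hk1 : k = n - 1 := by simp at hk; omega
      simp only [pvSplit, hk1]
      by_cases hd : pvDelim x <;> simp [hd]
    | cons y ys =>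
      have hk2 : (k == n - 1) = false := by
        simp only [List.length_cons] at hk; push_cast at hk
        rw [beq_eq_false_iff_ne]; omega
      have hk' : (k + 1) + ((y :: ys).length : Int) = n := by
        simp only [List.length_cons] at hk ⊢; push_cast at hk ⊢; omega
      by_cases hd : pvDelim x
      · simpa [hd, hk2, pvSplit, List.append_assoc] using
          ih (k + 1) (lom ++ [cur]) [x] (by simp) hk'
      · simpa [hd, hk2, pvSplit] using ih (k + 1) lom (cur ++ [x]) (by simp) hk'

theorem pvShift (pre zs : List String) (pts : List Nat) :
    pvChunks (pre ++ zs) (pts.map (· + pre.length)) = pvChunks zs pts := by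
  induction pts with
  | nil => simp [pvChunks]
  | cons p pts ih =>
    cases pts with
    | nil => simp [pvChunks]
    | cons q rest =>
      simp only [List.map_cons, pvChunks, List.map_cons] at ih ⊢
      rw [ih]
      congr 1
      rw [List.drop_append]
      have h1 : (pre.drop (p + pre.length)) = [] := by
        apply List.drop_eq_nil_of_le; omega
      have h2 : p + pre.length - pre.length = p := by omega
      have h3 : q + pre.length - (p + pre.length) = q - p := by omega
      simp [h1, h2, h3]

theorem pvG (ys : List String) (cur : List String) :
    pvChunks (cur ++ ys) (0 :: (pvIdx ys).map (· + cur.length) ++ [cur.length + ys.length])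
      = pvSplit cur ys := by
  induction ys generalizing cur with
  | nil => simp [pvIdx, pvChunks, pvSplit]
  | cons y ys ih =>
    by_cases hd : pvDelim y
    · simp only [pvIdx, hd, if_pos, List.map_cons, List.cons_append, List.length_cons,
        Nat.zero_add]
      rw [pvSplit]; simp only [hd, if_pos]
      rw [pvChunks]
      congr 1
      · exact List.take_left' rfl
      · have elast : cur.length + (ys.length + 1) = (1 + ys.length) + cur.length := by omega
        have e1 : (cur.length :: (((pvIdx ys).map (· + 1)).map (· + cur.length) ++ [cur.length + (ys.length + 1)]))
            = ((0 :: (pvIdx ys).map (· + 1) ++ [1 + ys.length]).map (· + cur.length)) := by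
          simp only [List.map_cons, List.map_append, List.map_nil, Nat.zero_add,
            List.cons_append, elast]
        rw [e1, pvShift cur (y :: ys)]
        have h2 := ih [y]
        simp only [List.length_cons, List.length_nil, Nat.zero_add, List.singleton_append] at h2
        rw [← h2]
    · simp only [pvIdx, pvSplit, hd, Bool.false_eq_true, if_false]
      have hassoc : cur ++ y :: ys = (cur ++ [y]) ++ ys := by simp
      have hmap : ((pvIdx ys).map (· + 1)).map (· + cur.length)
          = (pvIdx ys).map (· + (cur ++ [y]).length) := by
        simp only [List.map_map]
        apply List.map_congr_left; intro a _; simp; omega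
      have hlen : cur.length + (y :: ys).length = (cur ++ [y]).length + ys.length := by
        simp; omega
      rw [hassoc, hmap, hlen]
      exact ih (cur ++ [y])

theorem pvBounds (xs : List String) (k : Int) :
    (((PySem.List.enumerate xs k).filter (fun p => pvDelim p.2)).map (·.1))
      = (pvIdx xs).map (fun a => Int.ofNat a + k) := by
  induction xs generalizing k with
  | nil => simp [pvIdx, PySem.List.enumerate_nil]
  | cons x xs ih =>
    rw [PySem.List.enumerate_cons]
    by_cases hd : pvDelim x
    · simp only [pvIdx, hd, if_pos, List.filter_cons, List.map_cons]
      rw [ih (k + 1)]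
      simp only [List.map_map]
      congr 1
      · simp
      · apply List.map_congr_left; intro a _
        simp only [Function.comp_apply, Int.ofNat_eq_natCast]; push_cast; ring
    · simp only [pvIdx, hd, Bool.false_eq_true, if_false, List.filter_cons]
      rw [ih (k + 1), List.map_map]
      apply List.map_congr_left; intro a _
      simp only [Function.comp_apply, Int.ofNat_eq_natCast]; push_cast; ring

theorem pvZipSlices (xs : List String) (ptsN : List Nat) :
    (((ptsN.map Int.ofNat).zip ((ptsN.map Int.ofNat).drop 1)).map
      (fun p => PySem.List.slice xs (some p.1) (some p.2))) = pvChunks xs ptsN := by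
  induction ptsN with
  | nil => simp [pvChunks]
  | cons p pts ih =>
    cases pts with
    | nil => simp [pvChunks]
    | cons q rest =>
      simp only [List.map_cons, List.drop_succ_cons, List.drop_zero, List.zip_cons_cons,
        pvChunks] at ih ⊢
      simp only [Int.ofNat_eq_natCast]
      rw [PySem.List.slice_natCast]
      refine congrArg₂ _ rfl ?_
      simpa [Int.ofNat_eq_natCast] using ih

theorem pvAltChunks (xs : List String) (hne : xs ≠ []) :
    break_into_matrices_alt xs = pvChunks xs (0 :: pvIdx xs ++ [xs.length]) := by
  simp only [break_into_matrices_alt, if_neg hne]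
  rw [pvBounds xs 0, PySem.List.slice_from_one, ← List.drop_one]
  have hmap : ([(0 : Int)] ++ (pvIdx xs).map (fun a => Int.ofNat a + 0) ++ [(xs.length : Int)])
      = ((0 :: pvIdx xs ++ [xs.length]).map Int.ofNat) := by
    simp [Int.ofNat_eq_natCast]
  rw [hmap]
  exact pvZipSlices xs (0 :: pvIdx xs ++ [xs.length])

theorem pvAEq (xs : List String) (hne : xs ≠ []) :
    break_into_matrices xs = pvSplit [] xs := by
  unfold break_into_matrices
  simpa using pvFoldA xs (xs.length : Int) 0 [] [] hne (by omega)

-- ===== VERDICT (by name: the statement is the Claim_ definition above) =====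
theorem break_into_matrices_spec : Claim_equal_break_into_matrices := by
  intro xs _
  unfold Spec_break_into_matrices
  by_cases hne : xs = []
  · subst hne; rfl
  · rw [pvAEq xs hne, pvAltChunks xs hne]
    have := pvG xs []
    simpa using this.symm
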